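-- pv_equiv track=rewrite | github.com/emma-tk-wright/CISC-121-Project | app.py | binary_search_steps
-- ===== SOURCE A (Python) =====
-- def binary_search_steps(arr, target):
--     """
--     Perform binary search on a sorted list and return:
--     - a string explaining each step
--     - the final result (found / not found)
--     """
--     steps = [] # Initialize a list to store the explanation steps
--     low = 0 # Initialize the lower bound of the search range
--     high = len(arr) - 1 # Initialize the upper bound of the search range
--     step_num = 1 # Counter for step number
--
--     # Continue searching as long as the lower bound is less than or equal to the upper bound
--     while low <= high:
--         mid = (low + high) // 2 # Calculate the middle index
--         steps.append(
--             f"Step {step_num}: low = {low}, high = {high}, mid = {mid}, arr[mid] = {arr[mid]}"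
--         )
--
--         if arr[mid] == target:
--             # If the middle element is the target, we found it
--             steps.append(f" Target {target} found at index {mid}.")
--             return "\n".join(steps) # Join all steps into a single string and return
--         elif arr[mid] < target:
--             # If the target is greater, search in the right half
--             steps.append(
--                 f"Target {target} is greater than {arr[mid]} → search the RIGHT half (mid + 1 to high)."
--             )
--             low = mid + 1 # Adjust the lower bound
--         else:
--             # If the target is smaller, search in the left half
--             steps.append(
--                 f"Target {target} is less than {arr[mid]} → search the LEFT half (low to mid - 1)."
--             )
--             high = mid - 1 # Adjust the upper bound
--
--         steps.append("")  # Add a blank line between steps for readability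
--         step_num += 1 # Increment step counter
--
--     # If the loop finishes, the target was not found
--     steps.append(f" Target {target} was not found in the list.")
--     return "\n".join(steps) # Return the steps indicating target not found
-- ===== SOURCE B (Python) =====
-- def _trace(arr, target, low, high):
--     """Return (probes, found): list of (low, high, mid) states visited and
--     the found index (or None)."""
--     if low > high:
--         return [], None
--     mid = (low + high) // 2
--     if arr[mid] == target:
--         return [(low, high, mid)], mid
--     if arr[mid] < target:
--         rest, found = _trace(arr, target, mid + 1, high)
--     else:
--         rest, found = _trace(arr, target, low, mid - 1)
--     return [(low, high, mid)] + rest, found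
--
--
-- def _render(arr, target, probes, found, step_num):
--     if not probes:
--         return []
--     (low, high, mid), rest = probes[0], probes[1:]
--     lines = [f"Step {step_num}: low = {low}, high = {high}, mid = {mid}, arr[mid] = {arr[mid]}"]
--     if found is not None and not rest:
--         lines.append(f" Target {target} found at index {mid}.")
--     elif arr[mid] < target:
--         lines.append(f"Target {target} is greater than {arr[mid]} → search the RIGHT half (mid + 1 to high).")
--         lines.append("")
--     else:
--         lines.append(f"Target {target} is less than {arr[mid]} → search the LEFT half (low to mid - 1).")
--         lines.append("")
--     return lines + _render(arr, target, rest, found, step_num + 1)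
--
--
-- def binary_search_steps(arr, target):
--     probes, found = _trace(arr, target, 0, len(arr) - 1)
--     lines = _render(arr, target, probes, found, 1)
--     if found is None:
--         lines.append(f" Target {target} was not found in the list.")
--     return "\n".join(lines)
-- ===== Notes on version B (the rewrite author's own statement) =====
-- stated objective: alternative
-- what changed: A interleaves searching and formatting in one imperative while-loop with mutable low/high/steps; B first computes the search trace (the visited (low,high,mid) states plus the found index) by pure recursion, then renders the explanation lines from that trace in a second recursive pass.
import Mathlib
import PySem

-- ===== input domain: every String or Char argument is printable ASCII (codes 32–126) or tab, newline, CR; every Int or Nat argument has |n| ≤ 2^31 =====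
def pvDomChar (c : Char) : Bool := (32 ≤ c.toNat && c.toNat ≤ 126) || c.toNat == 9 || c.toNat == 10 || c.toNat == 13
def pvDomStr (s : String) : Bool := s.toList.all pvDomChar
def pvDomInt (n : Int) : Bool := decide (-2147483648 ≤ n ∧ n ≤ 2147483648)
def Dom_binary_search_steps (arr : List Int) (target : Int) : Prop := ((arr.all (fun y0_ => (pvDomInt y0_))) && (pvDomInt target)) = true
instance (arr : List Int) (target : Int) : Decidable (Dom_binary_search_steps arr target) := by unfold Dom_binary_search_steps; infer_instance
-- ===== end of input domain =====

-- B replaces A's single imperative while-loop (mutable low/high/steps/step_num) by a pure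
-- two-phase decomposition: compute the search trace recursively, then render the lines from it.

-- shared formatting helpers (the identical f-string literals of both Pythons)
def pvStepLine (n low high mid v : Int) : String :=
  "Step " ++ PySem.Int.toStr n ++ ": low = " ++ PySem.Int.toStr low ++ ", high = " ++
    PySem.Int.toStr high ++ ", mid = " ++ PySem.Int.toStr mid ++ ", arr[mid] = " ++ PySem.Int.toStr v
def pvFoundLine (t mid : Int) : String :=
  " Target " ++ PySem.Int.toStr t ++ " found at index " ++ PySem.Int.toStr mid ++ "."
def pvRightLine (t v : Int) : String :=
  "Target " ++ PySem.Int.toStr t ++ " is greater than " ++ PySem.Int.toStr v ++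
    " → search the RIGHT half (mid + 1 to high)."
def pvLeftLine (t v : Int) : String :=
  "Target " ++ PySem.Int.toStr t ++ " is less than " ++ PySem.Int.toStr v ++
    " → search the LEFT half (low to mid - 1)."
def pvNotFoundLine (t : Int) : String :=
  " Target " ++ PySem.Int.toStr t ++ " was not found in the list."

-- ===== PORT A =====
-- A's while-loop as recursion over the loop state (steps, low, high, step_num); the Nat fuel
-- only guarantees totality (each iteration shrinks high+1-low, so length+1 iterations suffice).
-- arr[mid]: the index is always in range on reachable states, so the .getD default is inert.
def pvAGo (arr : List Int) (target : Int) : Nat → Int → Int → Int → List String → String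
  | 0, _, _, _, steps => String.intercalate "\n" (steps ++ [pvNotFoundLine target])
  | fuel + 1, low, high, stepNum, steps =>
    if low ≤ high then
      let mid := PySem.Int.floordiv (low + high) 2
      let v := (PySem.List.pyGet? arr mid).getD 0
      let steps1 := steps ++ [pvStepLine stepNum low high mid v]
      if v = target then
        String.intercalate "\n" (steps1 ++ [pvFoundLine target mid])
      else if v < target then
        pvAGo arr target fuel (mid + 1) high (stepNum + 1) (steps1 ++ [pvRightLine target v, ""])
      else
        pvAGo arr target fuel low (mid - 1) (stepNum + 1) (steps1 ++ [pvLeftLine target v, ""])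
    else String.intercalate "\n" (steps ++ [pvNotFoundLine target])

def binary_search_steps (arr : List Int) (target : Int) : String :=
  pvAGo arr target (arr.length + 1) 0 ((arr.length : Int) - 1) 1 []

-- ===== PORT B =====
-- _trace: the visited (low, high, mid) states plus the found index (none = not found);
-- the Nat fuel is only a totality guard, as in pvAGo.
def pvTraceGo (arr : List Int) (target : Int) : Nat → Int → Int → List (Int × Int × Int) × Option Int
  | 0, _, _ => ([], none)
  | fuel + 1, low, high =>
    if low ≤ high then
      let mid := PySem.Int.floordiv (low + high) 2
      let v := (PySem.List.pyGet? arr mid).getD 0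
      if v = target then ([(low, high, mid)], some mid)
      else if v < target then
        let r := pvTraceGo arr target fuel (mid + 1) high
        ((low, high, mid) :: r.1, r.2)
      else
        let r := pvTraceGo arr target fuel low (mid - 1)
        ((low, high, mid) :: r.1, r.2)
    else ([], none)

-- _render: format the explanation lines from the trace
def pvRender (arr : List Int) (target : Int) (probes : List (Int × Int × Int))
    (found : Option Int) (stepNum : Int) : List String :=
  match probes with
  | [] => []
  | (low, high, mid) :: rest =>
    let v := (PySem.List.pyGet? arr mid).getD 0
    let lines := [pvStepLine stepNum low high mid v]
    let lines :=
      if found.isSome ∧ rest = [] then lines ++ [pvFoundLine target mid]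
      else if v < target then lines ++ [pvRightLine target v, ""]
      else lines ++ [pvLeftLine target v, ""]
    lines ++ pvRender arr target rest found (stepNum + 1)

def binary_search_steps_alt (arr : List Int) (target : Int) : String :=
  let r := pvTraceGo arr target (arr.length + 1) 0 ((arr.length : Int) - 1)
  let lines := pvRender arr target r.1 r.2 1
  let lines := if r.2 = none then lines ++ [pvNotFoundLine target] else lines
  String.intercalate "\n" lines

-- ===== PRECONDITION & SPEC =====
def Spec_binary_search_steps (arr : List Int) (target : Int) (out : String) : Prop := out = binary_search_steps_alt arr target
instance (arr : List Int) (target : Int) (out : String) : Decidable (Spec_binary_search_steps arr target out) := by unfold Spec_binary_search_steps; infer_instance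

-- ===== CLAIM (what is proved, stated in full; the proofs are below) =====
def Claim_equal_binary_search_steps : Prop := ∀ (arr : List Int) (target : Int), Dom_binary_search_steps arr target → Spec_binary_search_steps arr target (binary_search_steps arr target)

-- ===== LEMMAS AND PROOFS =====

-- an empty trace means nothing was found
theorem pvTraceGo_nil_none (arr : List Int) (target : Int) (fuel : Nat) (low high : Int)
    (h : (pvTraceGo arr target fuel low high).1 = []) :
    (pvTraceGo arr target fuel low high).2 = none := by
  cases fuel with
  | zero => simp [pvTraceGo]
  | succ fuel =>
    simp only [pvTraceGo] at h ⊢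
    split_ifs at h ⊢ <;> simp_all

-- the loop of A produces exactly the joined rendering of the trace
theorem pvAGo_eq (arr : List Int) (target : Int) :
    ∀ (fuel : Nat) (low high stepNum : Int) (steps : List String),
      (high + 1 - low).toNat ≤ fuel →
      pvAGo arr target fuel low high stepNum steps =
        String.intercalate "\n"
          (steps ++ pvRender arr target (pvTraceGo arr target fuel low high).1
              (pvTraceGo arr target fuel low high).2 stepNum ++
            (if (pvTraceGo arr target fuel low high).2 = none then [pvNotFoundLine target] else [])) := by
  intro fuel
  induction fuel with
  | zero =>
    intro low high stepNum steps _
    simp [pvAGo, pvTraceGo, pvRender]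
  | succ fuel ih =>
    intro low high stepNum steps hm
    simp only [pvAGo, pvTraceGo]
    set mid := PySem.Int.floordiv (low + high) 2 with hmiddef
    set v := (PySem.List.pyGet? arr mid).getD 0 with hvdef
    by_cases h : low ≤ high
    · have hb : low ≤ mid ∧ mid ≤ high := by
        rw [hmiddef]; exact PySem.Int.floordiv_two_mid_bounds h
      by_cases h2 : v = target
      · simp [← hvdef, h, h2, pvRender, List.append_assoc]
      · by_cases h3 : v < target
        · have hm' : (high + 1 - (mid + 1)).toNat ≤ fuel := by omega
          rw [if_pos h, if_pos h, if_neg h2, if_neg h2, if_pos h3, if_pos h3,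
            ih (mid + 1) high (stepNum + 1) _ hm']
          by_cases hr : (pvTraceGo arr target fuel (mid + 1) high).1 = []
          · have hnone := pvTraceGo_nil_none arr target fuel (mid + 1) high hr
            simp [← hvdef, pvRender, hr, hnone, h3, List.append_assoc]
          · simp [← hvdef, pvRender, hr, h3, List.append_assoc]
        · have hm' : (mid - 1 + 1 - low).toNat ≤ fuel := by omega
          rw [if_pos h, if_pos h, if_neg h2, if_neg h2, if_neg h3, if_neg h3,
            ih low (mid - 1) (stepNum + 1) _ hm']
          by_cases hr : (pvTraceGo arr target fuel low (mid - 1)).1 = []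
          · have hnone := pvTraceGo_nil_none arr target fuel low (mid - 1) hr
            simp [← hvdef, pvRender, hr, hnone, h3, List.append_assoc]
          · simp [← hvdef, pvRender, hr, h3, List.append_assoc]
    · simp [h, pvRender]

-- ===== VERDICT (by name: the statement is the Claim_ definition above) =====
theorem binary_search_steps_spec : Claim_equal_binary_search_steps := by
  intro arr target _
  unfold Spec_binary_search_steps binary_search_steps binary_search_steps_alt
  rw [pvAGo_eq arr target (arr.length + 1) 0 ((arr.length : Int) - 1) 1 [] (by omega)]
  simp only [List.nil_append]
  split <;> simp
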